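-- pv_equiv track=rewrite | github.com/Kwentar/toxic | main.py | preprocessing_text
-- ===== SOURCE A (Python) =====
-- def preprocessing_text(lst_with_text):
--     lst_new = []
--     available_symbols = 'qwertyuiopasdfghjklzxcvbnm.?!"\' -'
--     replaced = set()
--     for el in lst_with_text:
--         tmp_str = el.lower()
--         tmp_str2 = tmp_str
--         for sym in tmp_str:
--             if sym not in available_symbols:
--                 tmp_str2 = tmp_str2.replace(sym, ' ')
--                 replaced.add(sym)
--         lst_new.append(tmp_str2)
--     return lst_new
-- ===== SOURCE B (Python) =====
-- def preprocessing_text(lst_with_text):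
--     available_symbols = 'qwertyuiopasdfghjklzxcvbnm.?!"\' -'
--     return [''.join(c if c in available_symbols else ' ' for c in el.lower())
--             for el in lst_with_text]
-- ===== Notes on version B (the rewrite author's own statement) =====
-- stated objective: simpler
-- what changed: Replaces A's per-bad-character repeated str.replace scans (plus a tracked 'replaced' set) with a single character-wise pass that maps each disallowed character to a space while joining.
import Mathlib
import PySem

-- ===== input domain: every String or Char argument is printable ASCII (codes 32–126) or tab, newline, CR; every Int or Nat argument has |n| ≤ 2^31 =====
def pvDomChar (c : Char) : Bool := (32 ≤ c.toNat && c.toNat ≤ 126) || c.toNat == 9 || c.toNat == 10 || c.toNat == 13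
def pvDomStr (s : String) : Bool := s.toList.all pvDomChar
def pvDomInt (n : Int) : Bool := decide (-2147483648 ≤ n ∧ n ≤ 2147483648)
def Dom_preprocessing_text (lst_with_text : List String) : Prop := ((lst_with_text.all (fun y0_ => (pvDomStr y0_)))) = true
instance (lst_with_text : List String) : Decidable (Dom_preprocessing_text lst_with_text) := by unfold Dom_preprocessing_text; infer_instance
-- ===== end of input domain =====

-- B rewrites A's repeated per-character str.replace scans as one character-wise
-- mapping pass per string (simpler; the tracked 'replaced' set disappears).

-- ===== PORT A =====
def pvAvail : String := "qwertyuiopasdfghjklzxcvbnm.?!\"' -"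

-- one step of A's inner 'for sym in tmp_str' loop; state = (tmp_str2, replaced)
def pvStepA (st : String × PySem.Set Char) (sym : Char) : String × PySem.Set Char :=
  if PySem.Str.isIn (String.ofList [sym]) pvAvail then st
  else (PySem.Str.replace st.1 (String.ofList [sym]) " ", PySem.Set.add st.2 sym)

def preprocessing_text (lst_with_text : List String) : List String :=
  (lst_with_text.foldl
    (fun (acc : List String × PySem.Set Char) el =>
      let tmp_str := PySem.Str.lower el
      let inner := tmp_str.toList.foldl pvStepA (tmp_str, acc.2)
      (acc.1 ++ [inner.1], inner.2))
    ([], PySem.Set.empty)).1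

-- ===== PORT B =====
def pvCleanChar (c : Char) : Char :=
  if PySem.Chars.isIn [c] pvAvail.toList then c else ' '

def preprocessing_text_alt (lst_with_text : List String) : List String :=
  lst_with_text.map (fun el =>
    String.ofList ((PySem.Chars.lower el.toList).map pvCleanChar))

-- ===== PRECONDITION & SPEC =====
def Spec_preprocessing_text (lst_with_text : List String) (out : List String) : Prop := out = preprocessing_text_alt lst_with_text
instance (lst_with_text : List String) (out : List String) : Decidable (Spec_preprocessing_text lst_with_text out) := by unfold Spec_preprocessing_text; infer_instance

-- ===== CLAIM (what is proved, stated in full; the proofs are below) =====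
def Claim_equal_preprocessing_text : Prop := ∀ (lst_with_text : List String), Dom_preprocessing_text lst_with_text → Spec_preprocessing_text lst_with_text (preprocessing_text lst_with_text)

-- ===== LEMMAS AND PROOFS =====

theorem pv_infix_singleton (a : Char) (s : List Char) : [a] <:+: s ↔ a ∈ s := by
  constructor
  · intro h
    exact (List.singleton_sublist).1 h.sublist
  · intro h
    obtain ⟨t, u, rfl⟩ := List.append_of_mem h
    exact ⟨t, u, by simp⟩

theorem pv_isIn_singleton (a : Char) (s : List Char) :
    PySem.Chars.isIn [a] s = (a ∈ s : Bool) := by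
  by_cases h : a ∈ s
  · simp [h, (PySem.Chars.isIn_iff_infix [a] s).2 ((pv_infix_singleton a s).2 h)]
  · simp only [h, decide_false]
    rcases hb : PySem.Chars.isIn [a] s with _ | _
    · rfl
    · exact absurd ((pv_infix_singleton a s).1 ((PySem.Chars.isIn_iff_infix [a] s).1 hb)) h

-- single-char replace is a character map
theorem pv_replace_go_single (a b : Char) :
    ∀ (fuel : Nat) (l acc : List Char), l.length ≤ fuel →
    PySem.Chars.replace.go [a] [b] fuel l acc
      = acc.reverse ++ l.map (fun c => if c = a then b else c) := by
  intro fuel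
  induction fuel with
  | zero =>
    intro l acc h
    have : l = [] := List.eq_nil_of_length_eq_zero (Nat.le_zero.1 h)
    subst this
    simp [PySem.Chars.replace.go]
  | succ n ih =>
    intro l acc h
    cases l with
    | nil => simp [PySem.Chars.replace.go]
    | cons c t =>
      by_cases hc : c = a
      · subst hc
        have hpre : List.isPrefixOf [c] (c :: t) = true := by
          simp [List.isPrefixOf]
        rw [PySem.Chars.replace.go]
        simp only [hpre, if_pos]
        rw [ih _ _ (by simpa using Nat.le_of_succ_le_succ h)]
        simp
      · have hpre : List.isPrefixOf [a] (c :: t) = false := by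
          simp [List.isPrefixOf, BEq.beq]
          intro hh; exact absurd hh.symm hc
        rw [PySem.Chars.replace.go]
        simp only [hpre, Bool.false_eq_true, if_false]
        rw [ih t (c :: acc) (by simpa using Nat.le_of_succ_le_succ h)]
        simp [hc]

theorem pv_replace_single (s : List Char) (a b : Char) :
    PySem.Chars.replace s [a] [b] = s.map (fun c => if c = a then b else c) := by
  unfold PySem.Chars.replace
  simp only [List.isEmpty_cons, Bool.false_eq_true, if_false]
  exact pv_replace_go_single a b s.length s [] le_rfl

-- invariant of A's inner loop: the accumulated string is the original lowered
-- string with every already-processed disallowed character mapped to ' '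
theorem pv_inner (cs : List Char) :
    ∀ (rest : List Char) (B : List Char) (R : PySem.Set Char),
    (∀ b ∈ B, b ∉ pvAvail.toList) →
    (rest.foldl pvStepA
        (String.ofList (cs.map (fun c => if c ∈ B then ' ' else c)), R)).1
      = String.ofList (cs.map (fun c =>
          if c ∈ B ∨ (c ∈ rest ∧ c ∉ pvAvail.toList) then ' ' else c)) := by
  intro rest
  induction rest with
  | nil => intro B R hB; simp
  | cons x rs ih =>
    intro B R hB
    rw [List.foldl_cons]
    by_cases hx : x ∈ pvAvail.toList
    · have hstep : pvStepA (String.ofList (cs.map (fun c => if c ∈ B then ' ' else c)), R) x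
          = (String.ofList (cs.map (fun c => if c ∈ B then ' ' else c)), R) := by
        unfold pvStepA
        rw [if_pos]
        unfold PySem.Str.isIn
        simp only [String.toList_ofList]
        rw [pv_isIn_singleton]
        simpa using hx
      rw [hstep, ih B R hB]
      congr 1
      apply List.map_congr_left
      intro c _
      by_cases h1 : c ∈ B ∨ (c ∈ rs ∧ c ∉ pvAvail.toList)
      · rw [if_pos h1, if_pos]
        rcases h1 with h1 | h1
        · exact Or.inl h1
        · exact Or.inr ⟨List.mem_cons_of_mem _ h1.1, h1.2⟩
      · rw [if_neg h1, if_neg]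
        intro h2
        apply h1
        rcases h2 with h2 | h2
        · exact Or.inl h2
        · rcases List.mem_cons.1 h2.1 with rfl | hm
          · exact absurd hx h2.2
          · exact Or.inr ⟨hm, h2.2⟩
    · have hx' : x ≠ ' ' := by
        intro h; subst h; exact hx (by decide)
      have hstep : pvStepA (String.ofList (cs.map (fun c => if c ∈ B then ' ' else c)), R) x
          = (String.ofList (cs.map (fun c => if c ∈ B ++ [x] then ' ' else c)), PySem.Set.add R x) := by
        unfold pvStepA
        rw [if_neg]
        · congr 1
          unfold PySem.Str.replace
          simp only [String.toList_ofList]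
          have : (" " : String).toList = [' '] := by decide
          rw [this, pv_replace_single, List.map_map]
          congr 1
          apply List.map_congr_left
          intro c _
          simp only [Function.comp, List.mem_append, List.mem_singleton]
          by_cases hcB : c ∈ B
          · simp [hcB, (hx'.symm : ' ' ≠ x)]
          · by_cases hcx : c = x
            · subst hcx
              simp [hcB]
            · simp [hcB, hcx]
        · unfold PySem.Str.isIn
          simp only [String.toList_ofList]
          rw [pv_isIn_singleton]
          simpa using hx
      rw [hstep, ih (B ++ [x]) (PySem.Set.add R x)
        (by intro b hb; rcases List.mem_append.1 hb with hb | hb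
            · exact hB b hb
            · rw [List.mem_singleton.1 hb]; exact hx)]
      congr 1
      apply List.map_congr_left
      intro c _
      by_cases h1 : c ∈ B ∨ (c ∈ x :: rs ∧ c ∉ pvAvail.toList)
      · rw [if_pos h1, if_pos]
        rcases h1 with h1 | h1
        · exact Or.inl (List.mem_append.2 (Or.inl h1))
        · rcases List.mem_cons.1 h1.1 with rfl | hm
          · exact Or.inl (List.mem_append.2 (Or.inr (List.mem_singleton.2 rfl)))
          · exact Or.inr ⟨hm, h1.2⟩
      · rw [if_neg h1, if_neg]
        intro h2
        apply h1
        rcases h2 with h2 | h2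
        · rcases List.mem_append.1 h2 with h2 | h2
          · exact Or.inl h2
          · rw [List.mem_singleton.1 h2]
            exact Or.inr ⟨List.mem_cons_self, hx⟩
        · exact Or.inr ⟨List.mem_cons_of_mem _ h2.1, h2.2⟩

-- one element of A's outer loop produces exactly B's cleaned string
theorem pv_element (el : String) (R : PySem.Set Char) :
    ((PySem.Str.lower el).toList.foldl pvStepA (PySem.Str.lower el, R)).1
      = String.ofList ((PySem.Chars.lower el.toList).map pvCleanChar) := by
  set cs := (PySem.Str.lower el).toList with hcs
  have h0 : PySem.Str.lower el = String.ofList (cs.map (fun c => if c ∈ ([] : List Char) then ' ' else c)) := by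
    simp [hcs, PySem.Str.lower]
  rw [h0, pv_inner cs cs [] R (by simp)]
  have hlist : cs = PySem.Chars.lower el.toList := by
    simp [hcs, PySem.Str.lower]
  rw [← hlist]
  congr 1
  apply List.map_congr_left
  intro c hc
  unfold pvCleanChar
  rw [pv_isIn_singleton]
  by_cases h : c ∈ pvAvail.toList
  · simp [h, hc]
  · simp [h, hc]

-- A's outer fold appends B's per-element results, whatever the carried set is
theorem pv_outer (lst : List String) :
    ∀ (done : List String) (R : PySem.Set Char),
    (lst.foldl
      (fun (acc : List String × PySem.Set Char) el =>
        let tmp_str := PySem.Str.lower el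
        let inner := tmp_str.toList.foldl pvStepA (tmp_str, acc.2)
        (acc.1 ++ [inner.1], inner.2))
      (done, R)).1
      = done ++ preprocessing_text_alt lst := by
  induction lst with
  | nil => intro done R; simp [preprocessing_text_alt]
  | cons x xs ih =>
    intro done R
    rw [List.foldl_cons]
    simp only
    rw [ih]
    rw [pv_element x R]
    simp [preprocessing_text_alt]

-- ===== VERDICT (by name: the statement is the Claim_ definition above) =====
theorem preprocessing_text_spec : Claim_equal_preprocessing_text := by
  intro lst _
  unfold Spec_preprocessing_text preprocessing_text
  rw [pv_outer lst [] PySem.Set.empty]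
  simp
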